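-- pv_equiv track=rewrite | github.com/Shiv2071/Discrete-cascade-model | model_simulation/run_radical.py | two_chains_bridge_neighbors
-- ===== SOURCE A (Python) =====
-- from typing import List, Tuple, Optional
--
-- def two_chains_bridge_neighbors(P1: int, P2: int) -> List[List[int]]:
--     """Chain 1: sites 0..P1-1. Chain 2: sites P1..P1+P2-1. One edge between P1-1 and P1."""
--     P = P1 + P2
--     neighbors = []
--     for p in range(P):
--         if p < P1:
--             nb = []
--             if p > 0:
--                 nb.append(p - 1)
--             if p < P1 - 1:
--                 nb.append(p + 1)
--             elif P2 > 0:
--                 nb.append(P1)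
--             neighbors.append(nb)
--         else:
--             nb = []
--             if p > P1:
--                 nb.append(p - 1)
--             elif P1 > 0:
--                 nb.append(P1 - 1)
--             if p < P - 1:
--                 nb.append(p + 1)
--             neighbors.append(nb)
--     return neighbors
-- ===== SOURCE B (Python) =====
-- from typing import List
--
-- def two_chains_bridge_neighbors(P1: int, P2: int) -> List[List[int]]:
--     """The two bridged chains form one path on P = P1 + P2 sites: enumerate the
--     P-1 edges and scatter each edge to both endpoints' lists."""
--     P = P1 + P2
--     neighbors = [[] for _ in range(P)]
--     for i in range(P - 1):
--         neighbors[i].append(i + 1)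
--         neighbors[i + 1].append(i)
--     return neighbors
-- ===== Notes on version B (the rewrite author's own statement) =====
-- stated objective: simpler
-- what changed: B treats the two bridged chains as the single path they form: it pre-allocates P empty lists and makes one pass over the P-1 edges, appending each edge to both endpoints, instead of computing every node's list independently via the chain-1/chain-2 branch cases. Pre_ excludes only negative chain lengths with P1+P2 >= 1, where A returns lists containing phantom site indices outside 0..P-1; when P1+P2 <= 0 both return [].
-- outside the precondition, e.g. on two_chains_bridge_neighbors(-1, 3): A returns [[-1, 1], [0]], B returns [[1], [0]]; on two_chains_bridge_neighbors(3, -1): A returns [[1], [0, 2]], B returns [[1], [0]]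
import Mathlib
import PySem

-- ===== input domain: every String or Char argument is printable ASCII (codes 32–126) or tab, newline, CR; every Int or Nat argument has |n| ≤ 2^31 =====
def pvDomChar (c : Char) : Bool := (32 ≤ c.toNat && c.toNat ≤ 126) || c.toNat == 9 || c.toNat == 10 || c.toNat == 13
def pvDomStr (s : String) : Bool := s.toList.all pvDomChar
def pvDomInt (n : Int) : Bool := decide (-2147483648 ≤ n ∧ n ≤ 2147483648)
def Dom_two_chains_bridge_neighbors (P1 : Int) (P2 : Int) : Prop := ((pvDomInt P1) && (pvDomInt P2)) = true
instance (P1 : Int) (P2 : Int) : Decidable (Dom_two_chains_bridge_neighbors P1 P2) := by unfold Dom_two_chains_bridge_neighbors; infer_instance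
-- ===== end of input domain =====

-- B builds the same adjacency list with one pass over the P-1 edges of the combined path
-- (scattering each edge to both endpoints) instead of per-node branch cases; objective: simpler.

-- ===== PORT A =====
def two_chains_bridge_neighbors (P1 : Int) (P2 : Int) : List (List Int) :=
  let P := P1 + P2
  (PySem.List.pyRange 0 P 1).foldl
    (fun neighbors p =>
      if p < P1 then
        let nb : List Int := []
        let nb := if p > 0 then nb ++ [p - 1] else nb
        let nb :=
          if p < P1 - 1 then nb ++ [p + 1]
          else if P2 > 0 then nb ++ [P1] else nb
        neighbors ++ [nb]
      else
        let nb : List Int := []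
        let nb := if p > P1 then nb ++ [p - 1] else if P1 > 0 then nb ++ [P1 - 1] else nb
        let nb := if p < P - 1 then nb ++ [p + 1] else nb
        neighbors ++ [nb])
    []

-- ===== PORT B =====
def two_chains_bridge_neighbors_alt (P1 : Int) (P2 : Int) : List (List Int) :=
  let P := P1 + P2
  let neighbors := (PySem.List.pyRange 0 P 1).map (fun _ => ([] : List Int))
  (PySem.List.pyRange 0 (P - 1) 1).foldl
    (fun nbs i =>
      -- i and i+1 are nonnegative and within bounds for every i drawn from range(P-1),
      -- so List.modify is exact here for Python's in-place neighbors[j].append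
      let nbs := nbs.modify i.toNat (· ++ [i + 1])
      nbs.modify (i + 1).toNat (· ++ [i]))
    neighbors

-- ===== PRECONDITION & SPEC =====
-- Pre_ excludes only the inputs outside the natural domain of chain lengths where the two
-- results can differ: a negative P1 or P2 with P1 + P2 ≥ 1, where A still RETURNS but its
-- per-node branches emit phantom site indices (such as -1 or a site ≥ P) outside the
-- 0..P-1 sites; B builds the honest path there. (When P1 + P2 ≤ 0 both return [].)
def Pre_two_chains_bridge_neighbors (P1 : Int) (P2 : Int) : Prop := (0 ≤ P1 ∧ 0 ≤ P2) ∨ P1 + P2 ≤ 0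
instance (P1 : Int) (P2 : Int) : Decidable (Pre_two_chains_bridge_neighbors P1 P2) := by unfold Pre_two_chains_bridge_neighbors; infer_instance

def pvWitness_two_chains_bridge_neighbors : Int × Int := (2, 3)

def Spec_two_chains_bridge_neighbors (P1 : Int) (P2 : Int) (out : List (List Int)) : Prop := out = two_chains_bridge_neighbors_alt P1 P2
instance (P1 : Int) (P2 : Int) (out : List (List Int)) : Decidable (Spec_two_chains_bridge_neighbors P1 P2 out) := by unfold Spec_two_chains_bridge_neighbors; infer_instance

-- ===== CLAIM (what is proved, stated in full; the proofs are below) =====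
def Claim_equal_two_chains_bridge_neighbors : Prop := ∀ (P1 : Int) (P2 : Int), Dom_two_chains_bridge_neighbors P1 P2 → Pre_two_chains_bridge_neighbors P1 P2 → Spec_two_chains_bridge_neighbors P1 P2 (two_chains_bridge_neighbors P1 P2)

-- ===== LEMMAS AND PROOFS =====

-- the adjacency list of the path on n nodes, node by node: the common shape of both results
def pathEntry (n : Nat) (p : Nat) : List Int :=
  (if 0 < p then [(p : Int) - 1] else []) ++ (if p + 1 < n then [(p : Int) + 1] else [])

def pathAdj (n : Nat) : List (List Int) := (List.range n).map (pathEntry n)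

-- the per-node list A's loop body appends for node p
def entryA (P1 P2 p : Int) : List Int :=
  if p < P1 then
    let nb : List Int := []
    let nb := if p > 0 then nb ++ [p - 1] else nb
    if p < P1 - 1 then nb ++ [p + 1] else if P2 > 0 then nb ++ [P1] else nb
  else
    let nb : List Int := []
    let nb := if p > P1 then nb ++ [p - 1] else if P1 > 0 then nb ++ [P1 - 1] else nb
    if p < P1 + P2 - 1 then nb ++ [p + 1] else nb

lemma A_map (P1 P2 : Int) :
    two_chains_bridge_neighbors P1 P2 = (PySem.List.pyRange 0 (P1 + P2) 1).map (entryA P1 P2) := by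
  unfold two_chains_bridge_neighbors
  simp only []
  generalize PySem.List.pyRange 0 (P1 + P2) 1 = l
  suffices h : ∀ (l : List Int) (acc : List (List Int)),
      l.foldl (fun neighbors p =>
        if p < P1 then
          let nb : List Int := []
          let nb := if p > 0 then nb ++ [p - 1] else nb
          let nb :=
            if p < P1 - 1 then nb ++ [p + 1]
            else if P2 > 0 then nb ++ [P1] else nb
          neighbors ++ [nb]
        else
          let nb : List Int := []
          let nb := if p > P1 then nb ++ [p - 1] else if P1 > 0 then nb ++ [P1 - 1] else nb
          let nb := if p < P1 + P2 - 1 then nb ++ [p + 1] else nb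
          neighbors ++ [nb]) acc = acc ++ l.map (entryA P1 P2) by
    simpa using h l []
  intro l
  induction l with
  | nil => simp
  | cons p l ih =>
    intro acc
    rw [List.foldl_cons, ih, List.map_cons]
    by_cases h : p < P1 <;> simp [entryA, h]

lemma entryA_eq (P1 P2 : Int) (h1 : 0 ≤ P1) (h2 : 0 ≤ P2) (n k : Nat)
    (hn : P1 + P2 = (n : Int)) (hk : k < n) :
    entryA P1 P2 (k : Int) = pathEntry n k := by
  simp only [entryA, pathEntry]
  split_ifs <;> simp_all <;> omega

lemma A_eq_path (P1 P2 : Int) (h1 : 0 ≤ P1) (h2 : 0 ≤ P2) :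
    two_chains_bridge_neighbors P1 P2 = pathAdj (P1 + P2).toNat := by
  obtain ⟨n, hn⟩ : ∃ n : Nat, P1 + P2 = (n : Int) := ⟨(P1 + P2).toNat, by omega⟩
  rw [A_map, hn, Int.toNat_natCast, PySem.List.pyRange_zero_natCast, List.map_map]
  unfold pathAdj
  apply List.map_congr_left
  intro k hk
  simp only [Function.comp_apply]
  exact entryA_eq P1 P2 h1 h2 n k hn (List.mem_range.mp hk)

-- B's loop body, specialised to the Nat index k it is always called with
def stepN (nbs : List (List Int)) (k : Nat) : List (List Int) :=
  (nbs.modify k (· ++ [(k : Int) + 1])).modify (k + 1) (· ++ [(k : Int)])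

-- state of node j after the first m edges have been scattered
def pe (m j : Nat) : List Int :=
  (if 0 < j ∧ j ≤ m then [(j : Int) - 1] else []) ++ (if j < m then [(j : Int) + 1] else [])

lemma length_foldl_stepN (l : List Nat) (init : List (List Int)) :
    (l.foldl stepN init).length = init.length := by
  induction l generalizing init with
  | nil => rfl
  | cons k l ih => simp [ih, stepN]

lemma getElem_foldl_stepN (m : Nat) (n : Nat) (init : List (List Int))
    (hinit : init = List.replicate n []) (hm : m + 1 ≤ n) (j : Nat) (hj : j < n) :
    ((List.range m).foldl stepN init)[j]? = some (pe m j) := by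
  have hlen : ∀ l : List Nat, (l.foldl stepN init).length = n := by
    intro l; rw [length_foldl_stepN, hinit, List.length_replicate]
  induction m with
  | zero =>
    subst hinit
    rw [List.getElem?_eq_getElem (by simpa using hj)]
    simp [pe, List.getElem_replicate]
    omega
  | succ m ih =>
    rw [List.range_succ, List.foldl_append, List.foldl_cons, List.foldl_nil, stepN]
    have hj1 : j < ((List.range m).foldl stepN init).length := by rw [hlen]; omega
    rw [List.getElem?_eq_getElem (by simp [List.length_modify]; omega),
        List.getElem_modify, List.getElem_modify]
    have ihv : ((List.range m).foldl stepN init)[j] = pe m j := by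
      have := ih (by omega)
      rwa [List.getElem?_eq_getElem hj1, Option.some_inj] at this
    rw [ihv]
    by_cases h1 : m + 1 = j <;> by_cases h2 : m = j <;>
      simp only [h1, h2, pe, if_pos] <;>
      split_ifs <;> simp_all <;> omega

lemma B_eq_path (P1 P2 : Int) (h1 : 0 ≤ P1) (h2 : 0 ≤ P2) :
    two_chains_bridge_neighbors_alt P1 P2 = pathAdj (P1 + P2).toNat := by
  obtain ⟨n, hn⟩ : ∃ n : Nat, P1 + P2 = (n : Int) := ⟨(P1 + P2).toNat, by omega⟩
  unfold two_chains_bridge_neighbors_alt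
  simp only []
  rw [hn, Int.toNat_natCast]
  rcases Nat.eq_zero_or_pos n with h0 | hpos
  · subst h0
    simp [pathAdj, PySem.List.pyRange_one_eq_nil (by norm_num : (-1 : Int) ≤ 0),
      PySem.List.pyRange_one_eq_nil (le_refl (0 : Int))]
  · have hcast : ((n : Int) - 1) = ((n - 1 : Nat) : Int) := by omega
    rw [hcast, PySem.List.pyRange_zero_natCast, PySem.List.pyRange_zero_natCast, List.foldl_map]
    have hfn : (fun (nbs : List (List Int)) (k : Nat) =>
        let nbs' := nbs.modify ((k : Int)).toNat (· ++ [(k : Int) + 1])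
        nbs'.modify ((k : Int) + 1).toNat (· ++ [(k : Int)])) = stepN := by
      funext nbs k
      simp [stepN]
    rw [hfn]
    have hinit : (List.map (fun _ => ([] : List Int)) (List.map (fun k : Nat => (k : Int)) (List.range n)))
        = List.replicate n [] := by
      rw [List.map_map]
      simp [Function.comp_def, List.map_const']
    rw [hinit]
    apply List.ext_getElem?
    intro j
    rcases Nat.lt_or_ge j n with hj | hj
    · rw [getElem_foldl_stepN (n - 1) n _ rfl (by omega) j hj]
      rw [show (pathAdj n)[j]? = some (pathEntry n j) by
        simp [pathAdj, hj]]
      simp only [pe, pathEntry]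
      split_ifs <;> simp_all <;> omega
    · rw [List.getElem?_eq_none, List.getElem?_eq_none]
      · simp [pathAdj]; omega
      · rw [length_foldl_stepN, List.length_replicate]; omega

-- ===== VERDICT (by name: the statement is the Claim_ definition above) =====
theorem two_chains_bridge_neighbors_spec : Claim_equal_two_chains_bridge_neighbors := by
  intro P1 P2 _ hpre
  unfold Spec_two_chains_bridge_neighbors
  rcases hpre with ⟨h1, h2⟩ | hle
  · rw [A_eq_path P1 P2 h1 h2, B_eq_path P1 P2 h1 h2]
  · unfold two_chains_bridge_neighbors two_chains_bridge_neighbors_alt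
    simp [PySem.List.pyRange_one_eq_nil hle,
      PySem.List.pyRange_one_eq_nil (by omega : P1 + P2 - 1 ≤ 0)]
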